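-- pv_equiv track=rewrite | github.com/pypi-data/pypi-mirror-298 | packages/fz-td-recipe/fz_td_recipe-0.2.4.tar.gz/fz_td_recipe-0.2.4/fz_td_recipe/transform.py | _all_specific_directional_keys
-- ===== SOURCE A (Python) =====
-- _DIRECTIONAL_PREFIXES = ["src", "dst", "afferent", "efferent"]
--
-- def _is_directional(key):
--     """Determine if a column name indicates a direction."""
--     first = key.split("_", 1)[0]
--     return first in _DIRECTIONAL_PREFIXES
--
-- def _all_specific_directional_keys(group):
--     """Extracts all directional attributes that are not defaulted."""
--     keys = set()
--     if isinstance(group, (list, tuple)):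
--         _all_keys = set()
--         for rule in group:
--             _all_keys.update([k for k in rule.keys() if _is_directional(k)])
--         for key in _all_keys:
--             all_wildcards = all(r.get(key, "*") == "*" for r in group)
--             if not all_wildcards:
--                 keys.add(key)
--     else:
--         _all_keys = [c for c in group.columns if _is_directional(c)]
--         for key in _all_keys:
--             values = set(group[key].unique())
--             if values != set([-1]):
--                 keys.add(key)
--     return sorted(keys)
-- ===== SOURCE B (Python) =====
-- _DIRECTIONAL_PREFIXES = ["src", "dst", "afferent", "efferent"]
--
-- def _is_directional(key):
--     """Determine if a column name indicates a direction."""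
--     first = key.split("_", 1)[0]
--     return first in _DIRECTIONAL_PREFIXES
--
-- def _all_specific_directional_keys(group):
--     """Single pass over the rules: a directional key counts as soon as one
--     rule maps it to a non-wildcard value."""
--     return sorted({
--         k
--         for rule in group
--         for k, v in rule.items()
--         if v != "*" and _is_directional(k)
--     })
-- ===== Notes on version B (the rewrite author's own statement) =====
-- stated objective: simpler
-- what changed: Instead of collecting the set of directional keys and then rescanning every rule per key with get(key, '*'), B is a single set comprehension over the rules' items that adds a directional key as soon as it carries a non-wildcard value.
import Mathlib
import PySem

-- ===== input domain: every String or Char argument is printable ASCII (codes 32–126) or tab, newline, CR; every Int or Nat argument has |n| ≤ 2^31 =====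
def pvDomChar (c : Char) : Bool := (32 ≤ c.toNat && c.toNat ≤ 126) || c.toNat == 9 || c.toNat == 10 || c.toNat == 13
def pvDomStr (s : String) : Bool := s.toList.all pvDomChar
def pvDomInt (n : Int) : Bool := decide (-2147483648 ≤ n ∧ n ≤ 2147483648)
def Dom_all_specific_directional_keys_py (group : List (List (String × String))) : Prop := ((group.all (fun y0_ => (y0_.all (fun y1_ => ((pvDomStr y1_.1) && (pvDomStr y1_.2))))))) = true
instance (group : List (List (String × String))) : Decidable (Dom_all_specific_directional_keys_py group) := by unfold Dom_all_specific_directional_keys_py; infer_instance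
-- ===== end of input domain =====

-- B replaces A's per-key rescan of all rules by one pass over the rules' items. Equivalence is about the return value only.

-- ===== PORT A =====
-- shared module helper: _is_directional(key) = key.split("_", 1)[0] in _DIRECTIONAL_PREFIXES
def isDirectional (key : String) : Bool :=
  let first := ((PySem.Str.splitMax? key "_" 1).getD []).headD ""
  ["src", "dst", "afferent", "efferent"].contains first

def all_specific_directional_keys_py (group : List (List (String × String))) : List String :=
  -- _all_keys = set(); for rule in group: _all_keys.update([k for k in rule.keys() if _is_directional(k)])
  let allKeys : PySem.Set String :=
    group.foldl (fun s rule =>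
      PySem.Set.update s (((PySem.Dict.mk rule).keys).filter isDirectional)) PySem.Set.empty
  -- for key in _all_keys: if not all(r.get(key, "*") == "*" for r in group): keys.add(key)
  let keys : PySem.Set String :=
    allKeys.foldl (fun ks key =>
      if !(group.all (fun r => (PySem.Dict.mk r).getD key "*" == "*")) then PySem.Set.add ks key
      else ks) PySem.Set.empty
  PySem.List.sorted keys (fun x => x) false

-- ===== PORT B =====
def all_specific_directional_keys_py_alt (group : List (List (String × String))) : List String :=
  -- {k for rule in group for k, v in rule.items() if v != "*" and _is_directional(k)}
  let keys : PySem.Set String :=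
    group.foldl (fun s rule =>
      rule.foldl (fun s kv =>
        if kv.2 != "*" && isDirectional kv.1 then PySem.Set.add s kv.1 else s) s)
      PySem.Set.empty
  PySem.List.sorted keys (fun x => x) false

-- ===== PRECONDITION & SPEC =====
-- Pre_ excludes association lists in which a rule repeats a key: a Python dict cannot contain
-- duplicate keys, so such lists encode no Python input (every real input satisfies Pre_).
def Pre_all_specific_directional_keys_py (group : List (List (String × String))) : Prop :=
  ∀ rule ∈ group, (rule.map Prod.fst).Nodup
instance (group : List (List (String × String))) : Decidable (Pre_all_specific_directional_keys_py group) := by unfold Pre_all_specific_directional_keys_py; infer_instance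

def pvWitness_all_specific_directional_keys_py : (List (List (String × String))) :=
  [[("src_x", "a"), ("dst_y", "*")], [("syn", "b")]]

def Spec_all_specific_directional_keys_py (group : List (List (String × String))) (out : List String) : Prop := out = all_specific_directional_keys_py_alt group
instance (group : List (List (String × String))) (out : List String) : Decidable (Spec_all_specific_directional_keys_py group out) := by unfold Spec_all_specific_directional_keys_py; infer_instance

-- ===== CLAIM (what is proved, stated in full; the proofs are below) =====
def Claim_equal_all_specific_directional_keys_py : Prop := ∀ (group : List (List (String × String))), Dom_all_specific_directional_keys_py group → Pre_all_specific_directional_keys_py group → Spec_all_specific_directional_keys_py group (all_specific_directional_keys_py group)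

-- ===== LEMMAS AND PROOFS =====

-- membership in an 'update with a chunk per element' fold
theorem mem_foldl_update {α β : Type} [BEq α] [LawfulBEq α]
    (l : List β) (m : β → List α) (s : PySem.Set α) (y : α) :
    (y ∈ l.foldl (fun s r => PySem.Set.update s (m r)) s) ↔ y ∈ s ∨ ∃ r ∈ l, y ∈ m r := by
  induction l generalizing s with
  | nil => simp
  | cons hd tl ih =>
    simp [List.foldl_cons, ih, PySem.Set.mem_update]
    tauto

theorem nodup_foldl_update {α β : Type} [BEq α] [LawfulBEq α]
    (l : List β) (m : β → List α) (s : PySem.Set α) (hs : s.Nodup) :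
    (l.foldl (fun s r => PySem.Set.update s (m r)) s).Nodup := by
  induction l generalizing s with
  | nil => exact hs
  | cons hd tl ih => exact ih _ (PySem.Set.nodup_update _ _ hs)

-- A's inner fold is the set of allKeys-elements passing the wildcard test
theorem foldl_add_if_eq (c : String → Bool) (l : List String) (s : PySem.Set String) :
    l.foldl (fun ks key => if c key then PySem.Set.add ks key else ks) s
      = PySem.Set.update s (l.filter c) := by
  rw [PySem.List.foldl_if_eq_foldl_filter]
  rfl

-- B's inner fold as an update
theorem b_inner_eq (rule : List (String × String)) (s : PySem.Set String) :
    rule.foldl (fun s kv =>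
        if kv.2 != "*" && isDirectional kv.1 then PySem.Set.add s kv.1 else s) s
      = PySem.Set.update s
          (((rule.filter (fun kv => kv.2 != "*" && isDirectional kv.1)).map Prod.fst)) := by
  rw [PySem.List.foldl_if_eq_foldl_filter, PySem.Set.update_map_eq_foldl_add]

-- getD against a nodup rule reads off exactly the stored pair
theorem getD_ne_star_iff (rule : List (String × String)) (k : String)
    (hnd : (rule.map Prod.fst).Nodup) :
    (PySem.Dict.mk rule).getD k "*" ≠ "*" ↔ ∃ v, (k, v) ∈ rule ∧ v ≠ "*" := by
  have hk : (PySem.Dict.mk rule).keys.Nodup := by simpa [PySem.Dict.keys] using hnd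
  constructor
  · intro h
    cases hg : (PySem.Dict.mk rule).get? k with
    | none =>
      exact absurd (PySem.Dict.getD_of_get?_eq_none _ _ hg) h
    | some v =>
      refine ⟨v, ?_, ?_⟩
      · simpa [PySem.Dict.items] using PySem.Dict.mem_items_of_get?_eq_some _ hg
      · intro hv; subst hv
        exact h (PySem.Dict.getD_of_get?_eq_some _ _ hg)
  · rintro ⟨v, hmem, hv⟩
    have : (PySem.Dict.mk rule).getD k "*" = v :=
      PySem.Dict.getD_of_mem_items _ (by simpa [PySem.Dict.items] using hmem) hk "*"
    simpa [this] using hv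

-- characterisation of membership in A's final set
theorem mem_A_set (group : List (List (String × String))) (k : String) :
    (k ∈ (group.foldl (fun s rule =>
        PySem.Set.update s (((PySem.Dict.mk rule).keys).filter isDirectional)) PySem.Set.empty).foldl
        (fun ks key =>
          if !(group.all (fun r => (PySem.Dict.mk r).getD key "*" == "*")) then PySem.Set.add ks key
          else ks) PySem.Set.empty)
      ↔ (isDirectional k = true ∧ (∃ rule ∈ group, k ∈ rule.map Prod.fst)
          ∧ ∃ r ∈ group, (PySem.Dict.mk r).getD k "*" ≠ "*") := by
  rw [foldl_add_if_eq]
  simp only [PySem.Set.update_empty, PySem.Set.mem_ofList, List.mem_filter,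
    mem_foldl_update]
  simp [PySem.Dict.keys]
  tauto

-- characterisation of membership in B's set
theorem mem_B_set (group : List (List (String × String))) (k : String) :
    (k ∈ group.foldl (fun s rule =>
        rule.foldl (fun s kv =>
          if kv.2 != "*" && isDirectional kv.1 then PySem.Set.add s kv.1 else s) s)
        PySem.Set.empty)
      ↔ ∃ rule ∈ group, ∃ v, (k, v) ∈ rule ∧ v ≠ "*" ∧ isDirectional k = true := by
  have : (group.foldl (fun s rule =>
        rule.foldl (fun s kv =>
          if kv.2 != "*" && isDirectional kv.1 then PySem.Set.add s kv.1 else s) s)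
        PySem.Set.empty)
      = group.foldl (fun s rule =>
          PySem.Set.update s
            (((rule.filter (fun kv => kv.2 != "*" && isDirectional kv.1)).map Prod.fst)))
          PySem.Set.empty := by
    apply PySem.List.foldl_congr_mem
    intro acc rule _
    exact b_inner_eq rule acc
  rw [this, mem_foldl_update]
  simp only [List.mem_map, List.mem_filter, PySem.Set.empty]
  constructor
  · rintro (h | ⟨r, hr, ⟨⟨k', v⟩, ⟨hmem, hcond⟩, rfl⟩⟩)
    · simp at h
    · refine ⟨r, hr, v, hmem, ?_⟩
      simp only [Bool.and_eq_true, bne_iff_ne, ne_eq] at hcond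
      exact ⟨hcond.1, hcond.2⟩
  · rintro ⟨r, hr, v, hmem, hv, hd⟩
    refine Or.inr ⟨r, hr, ⟨(k, v), ⟨hmem, ?_⟩, rfl⟩⟩
    simp [hv, hd]

theorem nodup_A_set (group : List (List (String × String))) :
    ((group.foldl (fun s rule =>
        PySem.Set.update s (((PySem.Dict.mk rule).keys).filter isDirectional)) PySem.Set.empty).foldl
        (fun ks key =>
          if !(group.all (fun r => (PySem.Dict.mk r).getD key "*" == "*")) then PySem.Set.add ks key
          else ks) PySem.Set.empty).Nodup := by
  rw [foldl_add_if_eq]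
  rw [PySem.Set.update_empty]
  exact PySem.Set.nodup_ofList _

theorem nodup_B_set (group : List (List (String × String))) :
    (group.foldl (fun s rule =>
        rule.foldl (fun s kv =>
          if kv.2 != "*" && isDirectional kv.1 then PySem.Set.add s kv.1 else s) s)
        PySem.Set.empty).Nodup := by
  have : (group.foldl (fun s rule =>
        rule.foldl (fun s kv =>
          if kv.2 != "*" && isDirectional kv.1 then PySem.Set.add s kv.1 else s) s)
        PySem.Set.empty)
      = group.foldl (fun s rule =>
          PySem.Set.update s
            (((rule.filter (fun kv => kv.2 != "*" && isDirectional kv.1)).map Prod.fst)))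
          PySem.Set.empty := by
    apply PySem.List.foldl_congr_mem
    intro acc rule _
    exact b_inner_eq rule acc
  rw [this]
  exact nodup_foldl_update _ _ _ (by simp [PySem.Set.empty])

-- ===== VERDICT (by name: the statement is the Claim_ definition above) =====
theorem all_specific_directional_keys_py_spec : Claim_equal_all_specific_directional_keys_py := by
  intro group _ hpre
  unfold Spec_all_specific_directional_keys_py
  unfold all_specific_directional_keys_py all_specific_directional_keys_py_alt
  simp only []
  apply PySem.List.sorted_eq_sorted_of_perm
  · exact fun a b h => h
  · rw [List.perm_ext_iff_of_nodup (nodup_A_set group) (nodup_B_set group)]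
    intro k
    rw [mem_A_set, mem_B_set]
    constructor
    · rintro ⟨hd, -, r, hr, hne⟩
      obtain ⟨v, hmem, hv⟩ := (getD_ne_star_iff r k (hpre r hr)).mp hne
      exact ⟨r, hr, v, hmem, hv, hd⟩
    · rintro ⟨r, hr, v, hmem, hv, hd⟩
      refine ⟨hd, ⟨r, hr, ?_⟩, r, hr, ?_⟩
      · exact List.mem_map_of_mem hmem
      · exact (getD_ne_star_iff r k (hpre r hr)).mpr ⟨v, hmem, hv⟩
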